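-- pv_equiv track=rewrite | github.com/parasiitism/AlgoDaily | leetcode/1859-sorting-the-sentence/main.py | separateWord
-- ===== SOURCE A (Python) =====
-- def separateWord(w):
--     ranking = 0
--     N = len(w)
--     i = N - 1
--     while i >= 0 and w[i].isdigit():
--         d = int(w[i])
--         ranking += d * (10**(N - i - 1))
--         i -= 1
--     return w[:i+1], ranking
-- ===== SOURCE B (Python) =====
-- def separateWord(w):
--     i = len(w)
--     while i > 0 and w[i - 1].isdigit():
--         i -= 1
--     ranking = 0
--     for ch in w[i:]:
--         ranking = ranking * 10 + int(ch)
--     return w[:i], ranking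
-- ===== Notes on version B (the rewrite author's own statement) =====
-- stated objective: simpler
-- what changed: B separates boundary-finding from number-building: a bare right-to-left scan (no arithmetic) locates the start of the trailing digit run, then a left-to-right Horner fold parses it, replacing A's interleaved per-position accumulation with 10**(N-i-1) power computations.
import Mathlib
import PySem

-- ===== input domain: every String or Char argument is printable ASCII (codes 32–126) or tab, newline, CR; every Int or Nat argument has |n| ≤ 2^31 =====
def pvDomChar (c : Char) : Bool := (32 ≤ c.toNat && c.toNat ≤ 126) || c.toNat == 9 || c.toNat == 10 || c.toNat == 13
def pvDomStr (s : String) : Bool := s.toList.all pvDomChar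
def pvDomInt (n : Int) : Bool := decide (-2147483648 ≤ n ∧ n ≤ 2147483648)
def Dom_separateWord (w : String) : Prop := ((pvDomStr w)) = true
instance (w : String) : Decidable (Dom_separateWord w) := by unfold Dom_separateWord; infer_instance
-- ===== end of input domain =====

-- B separates boundary-finding from number-building (bare right-to-left scan, then a left-to-right
-- Horner fold), replacing A's interleaved per-position 10**(N-i-1) accumulation; objective: simpler.

-- int(single character): exact for ASCII digit characters (the only ones reaching it under the
-- loops' isdigit guards on the ASCII domain); used as the port of `int(w[i])` / `int(ch)`.
def pvDigitInt (c : Char) : Int := (PySem.Int.ofChars? [c]).getD 0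

-- ===== PORT A =====
-- the `while i >= 0 and w[i].isdigit()` loop of A; the Nat argument is i+1 (0 = loop exited at i = -1);
-- cs.getD i ' ' = w[i], in range throughout because i < N.
def pvLoopA (cs : List Char) (N : Nat) : Nat → Int → Nat × Int
  | 0, ranking => (0, ranking)
  | i + 1, ranking =>
    if PySem.Chars.isdigit (cs.getD i ' ') then
      pvLoopA cs N i (ranking + pvDigitInt (cs.getD i ' ') * 10 ^ (N - i - 1))
    else (i + 1, ranking)

def separateWord (w : String) : String × Int :=
  let cs := w.toList
  let N := cs.length
  let (stop, ranking) := pvLoopA cs N N 0       -- stop = i+1 of the exit index i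
  (String.mk (PySem.List.slice cs none (some (stop : Int))), ranking)   -- w[:i+1]

-- ===== PORT B =====
-- the `while i > 0 and w[i-1].isdigit(): i -= 1` boundary scan of B
def pvBoundary (cs : List Char) : Nat → Nat
  | 0 => 0
  | i + 1 => if PySem.Chars.isdigit (cs.getD i ' ') then pvBoundary cs i else i + 1

-- the `for ch in …: ranking = ranking * 10 + int(ch)` fold of B
def pvHorner (ranking : Int) (ds : List Char) : Int :=
  ds.foldl (fun r c => r * 10 + pvDigitInt c) ranking

def separateWord_alt (w : String) : String × Int :=
  let cs := w.toList
  let i := pvBoundary cs cs.length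
  (String.mk (PySem.List.slice cs none (some (i : Int))),            -- w[:i]
   pvHorner 0 (PySem.List.slice cs (some (i : Int)) none))           -- fold over w[i:]

-- ===== PRECONDITION & SPEC =====
def Spec_separateWord (w : String) (out : String × Int) : Prop := out = separateWord_alt w
instance (w : String) (out : String × Int) : Decidable (Spec_separateWord w out) := by unfold Spec_separateWord; infer_instance

-- ===== CLAIM (what is proved, stated in full; the proofs are below) =====
def Claim_equal_separateWord : Prop := ∀ (w : String), Dom_separateWord w → Spec_separateWord w (separateWord w)

-- ===== LEMMAS AND PROOFS =====

theorem pvBoundary_le (cs : List Char) : ∀ i, pvBoundary cs i ≤ i := by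
  intro i
  induction i with
  | zero => simp [pvBoundary]
  | succ i ih => unfold pvBoundary; split <;> omega

theorem pvHorner_append_singleton (r : Int) (ds : List Char) (c : Char) :
    pvHorner r (ds ++ [c]) = pvHorner r ds * 10 + pvDigitInt c := by
  simp [pvHorner]

-- the segment cs[a:i]
def pvSeg (cs : List Char) (a i : Nat) : List Char := (cs.drop a).take (i - a)

theorem pvSeg_snoc (cs : List Char) (a i : Nat) (ha : a ≤ i) (hi : i < cs.length) :
    pvSeg cs a (i + 1) = pvSeg cs a i ++ [cs.getD i ' '] := by
  unfold pvSeg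
  have h1 : i + 1 - a = (i - a) + 1 := by omega
  have h2 : i - a < (cs.drop a).length := by simp [List.length_drop]; omega
  rw [h1, List.take_succ]
  have : (cs.drop a)[i - a]? = some (cs.getD i ' ') := by
    rw [List.getElem?_drop]
    have : a + (i - a) = i := by omega
    rw [this, List.getD_eq_getElem cs ' ' hi, List.getElem?_eq_getElem hi]
  simp [this]

-- loop invariant: A's loop from index i-1 downward computes B's boundary and, shifted by the
-- remaining place value 10^(N-i), B's Horner value of the digit segment [boundary, i)
theorem pvLoopA_eq (cs : List Char) (N : Nat) (hN : N = cs.length) :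
    ∀ i, i ≤ N → ∀ r, pvLoopA cs N i r =
      (pvBoundary cs i, r + 10 ^ (N - i) * pvHorner 0 (pvSeg cs (pvBoundary cs i) i)) := by
  intro i
  induction i with
  | zero => intro _ r; simp [pvLoopA, pvBoundary, pvSeg, pvHorner]
  | succ i ih =>
    intro hle r
    unfold pvLoopA pvBoundary
    by_cases hd : PySem.Chars.isdigit (cs.getD i ' ')
    · rw [if_pos hd, if_pos hd, ih (by omega)]
      have hb := pvBoundary_le cs i
      rw [pvSeg_snoc cs (pvBoundary cs i) i hb (by omega), pvHorner_append_singleton]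
      simp only [Prod.mk.injEq, true_and]
      have he : N - i = (N - (i + 1)) + 1 := by omega
      have hp : (10:Int) ^ (N - i) = 10 ^ (N - (i + 1)) * 10 := by rw [he, pow_succ]
      rw [Nat.sub_sub, hp]; ring
    · rw [if_neg hd, if_neg hd]
      simp [pvSeg, pvHorner]

theorem pvSeg_full (cs : List Char) (a : Nat) : pvSeg cs a cs.length = cs.drop a := by
  unfold pvSeg
  apply List.take_of_length_le
  simp

-- ===== VERDICT (by name: the statement is the Claim_ definition above) =====
theorem separateWord_spec : Claim_equal_separateWord := by
  intro w _
  unfold Spec_separateWord separateWord separateWord_alt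
  simp only [pvLoopA_eq w.toList w.toList.length rfl w.toList.length le_rfl 0,
    Nat.sub_self, pow_zero, one_mul, zero_add, pvSeg_full, PySem.List.slice_from_natCast]
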